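-- pv_equiv track=rewrite | github.com/architadhole7/ai_ddr_generator | modules/merger.py | merge_observations
-- ===== SOURCE A (Python) =====
-- def merge_observations(inspection, thermal):
--     merged = []
--     used_thermal = set()
--
--     for ins in inspection:
--         area_ins = (ins.get("area") or "").lower()
--         details = ins.get("details", "")
--
--         # try to attach relevant data
--         for i, th in enumerate(thermal):
--             if i in used_thermal:
--                 continue
--
--             area_th = (th.get("area") or "").lower()
--
--             #  match if area overlaps OR similar keywords
--             if area_ins and area_th and (area_ins in area_th or area_th in area_ins):
--                 thermal_details = th.get("details", "")
--
--                 if thermal_details: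
--                     details += " | Thermal observation: " + thermal_details
--
--                 used_thermal.add(i)
--
--         # update cleaned observation
--         ins["details"] = details
--         merged.append(ins)
--
--     #  add leftover thermal observations (not matched)
--     for i, th in enumerate(thermal):
--         if i not in used_thermal:
--             merged.append(th)
--
--     return merged
-- ===== SOURCE B (Python) =====
-- def _first_match(areas, area_th):
--     # index of the first inspection whose non-empty lowered area overlaps area_th
--     for j, a in enumerate(areas):
--         if a and (a in area_th or area_th in a):
--             return j
--     return None
--
--
-- def merge_observations(inspection, thermal):
--     # Thermal-major pass: assign each thermal to the first matching inspection,
--     # accumulating the extra detail text per inspection index.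
--     areas = [(ins.get("area") or "").lower() for ins in inspection]
--     extra = {}
--     claimed = set()
--     for i, th in enumerate(thermal):
--         area_th = (th.get("area") or "").lower()
--         if not area_th:
--             continue
--         j = _first_match(areas, area_th)
--         if j is None:
--             continue
--         td = th.get("details", "")
--         if td:
--             extra[j] = extra.get(j, "") + " | Thermal observation: " + td
--         claimed.add(i)
--
--     merged = []
--     for j, ins in enumerate(inspection):
--         ins["details"] = ins.get("details", "") + extra.get(j, "")
--         merged.append(ins)
--     for i, th in enumerate(thermal):
--         if i not in claimed:
--             merged.append(th)
--     return merged
-- ===== Notes on version B (the rewrite author's own statement) =====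
-- stated objective: alternative
-- what changed: A does an inspection-major nested scan sharing a mutable used-thermal set across iterations; B does one thermal-major pass assigning each thermal to its first matching inspection via a helper, accumulating per-inspection extra text in a dict and a claimed set, then builds the output in two simple passes.
import Mathlib
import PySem

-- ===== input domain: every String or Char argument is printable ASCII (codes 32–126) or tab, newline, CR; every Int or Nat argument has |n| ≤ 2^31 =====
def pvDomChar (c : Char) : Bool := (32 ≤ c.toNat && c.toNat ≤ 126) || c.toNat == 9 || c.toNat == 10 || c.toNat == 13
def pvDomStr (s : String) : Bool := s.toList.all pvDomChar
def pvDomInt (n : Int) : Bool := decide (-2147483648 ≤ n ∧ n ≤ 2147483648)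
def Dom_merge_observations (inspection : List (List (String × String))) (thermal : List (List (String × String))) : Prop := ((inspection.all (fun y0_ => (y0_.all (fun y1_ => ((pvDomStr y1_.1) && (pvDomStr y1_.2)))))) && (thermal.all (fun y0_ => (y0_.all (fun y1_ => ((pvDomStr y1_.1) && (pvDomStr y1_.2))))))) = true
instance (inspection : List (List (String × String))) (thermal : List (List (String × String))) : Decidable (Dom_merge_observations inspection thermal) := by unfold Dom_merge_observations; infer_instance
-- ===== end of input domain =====

-- B replaces A's inspection-major nested scan over a shared used-set by a thermal-major
-- first-match assignment table (same values; both update each inspection dict in place).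


-- shared dict helpers (a Python dict is an association list here; lookup/overwrite via PySem.Dict)
def pvGetD (d : List (String × String)) (k dflt : String) : String := (PySem.Dict.mk d).getD k dflt
-- (d.get("area") or "").lower(); the 'or ""' collapses: a missing key gives "" and '"" or ""' is ""
def pvAreaLower (d : List (String × String)) : String := PySem.Str.lower (pvGetD d "area" "")
-- d["details"] = v  (overwrite in place, append if missing)
def pvSetDetails (d : List (String × String)) (v : String) : List (String × String) :=
  ((PySem.Dict.mk d).insert "details" v).items
-- 'td = th.get("details", ""); if td: s += " | Thermal observation: " + td'  (both Pythons verbatim)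
def pvTag (s : String) (th : List (String × String)) : String :=
  if pvGetD th "details" "" ≠ "" then s ++ " | Thermal observation: " ++ pvGetD th "details" "" else s

-- ===== PORT A =====
def merge_observations (inspection : List (List (String × String))) (thermal : List (List (String × String))) : List (List (String × String)) :=
  let r := inspection.foldl (fun (st : List (List (String × String)) × PySem.Set Int) ins =>
    let area_ins := pvAreaLower ins
    let p := (PySem.List.enumerate thermal).foldl (fun (p : String × PySem.Set Int) it =>
      if p.2.contains it.1 then p
      else
        let area_th := pvAreaLower it.2
        if area_ins != "" && area_th != "" && (PySem.Str.isIn area_ins area_th || PySem.Str.isIn area_th area_ins) then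
          (pvTag p.1 it.2, PySem.Set.add p.2 it.1)
        else p) (pvGetD ins "details" "", st.2)
    (st.1 ++ [pvSetDetails ins p.1], p.2)) ([], PySem.Set.empty)
  (PySem.List.enumerate thermal).foldl (fun m it => if r.2.contains it.1 then m else m ++ [it.2]) r.1

-- ===== PORT B =====
-- Source B helper _first_match: first inspection index whose non-empty area overlaps area_th
def pvFirstMatch (areas : List String) (area_th : String) : Option Nat :=
  areas.findIdx? (fun a => a != "" && (PySem.Str.isIn a area_th || PySem.Str.isIn area_th a))

def merge_observations_alt (inspection : List (List (String × String))) (thermal : List (List (String × String))) : List (List (String × String)) :=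
  let areas := inspection.map pvAreaLower
  let st := (PySem.List.enumerate thermal).foldl (fun (st : PySem.Dict Int String × PySem.Set Int) it =>
    let area_th := pvAreaLower it.2
    if area_th = "" then st
    else match pvFirstMatch areas area_th with
      | none => st
      | some j => (st.1.modify (j : Int) "" (fun s => pvTag s it.2), PySem.Set.add st.2 it.1))
    (PySem.Dict.empty, PySem.Set.empty)
  let merged := (PySem.List.enumerate inspection).foldl (fun m jt =>
    m ++ [pvSetDetails jt.2 (pvGetD jt.2 "details" "" ++ st.1.getD jt.1 "")]) []
  (PySem.List.enumerate thermal).foldl (fun m it => if st.2.contains it.1 then m else m ++ [it.2]) merged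

-- ===== PRECONDITION & SPEC =====
def Spec_merge_observations (inspection : List (List (String × String))) (thermal : List (List (String × String))) (out : List (List (String × String))) : Prop := out = merge_observations_alt inspection thermal
instance (inspection : List (List (String × String))) (thermal : List (List (String × String))) (out : List (List (String × String))) : Decidable (Spec_merge_observations inspection thermal out) := by unfold Spec_merge_observations; infer_instance

-- ===== CLAIM (what is proved, stated in full; the proofs are below) =====
def Claim_equal_merge_observations : Prop := ∀ (inspection : List (List (String × String))) (thermal : List (List (String × String))), Dom_merge_observations inspection thermal → Spec_merge_observations inspection thermal (merge_observations inspection thermal)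

-- ===== LEMMAS AND PROOFS =====

-- proof-side vocabulary --------------------------------------------------

-- A's inner match test for one inspection area a against a thermal dict
def pvHit (a : String) (th : List (String × String)) : Bool :=
  a != "" && pvAreaLower th != "" && (PySem.Str.isIn a (pvAreaLower th) || PySem.Str.isIn (pvAreaLower th) a)

def pvHitAny (done : List String) (th : List (String × String)) : Bool :=
  done.any (fun a => pvHit a th)

-- first inspection index claiming a thermal (none if its area is empty / nothing matches)
def pvFm (areas : List String) (th : List (String × String)) : Option Nat :=
  if pvAreaLower th = "" then none else pvFirstMatch areas (pvAreaLower th)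

def pvFmI (areas : List String) (th : List (String × String)) : Option Int :=
  (pvFm areas th).map (fun n => (n : Int))

def pvSel (areas : List String) (q : Int) (th : List (String × String)) : Bool :=
  pvFmI areas th == some q

-- accumulated extra text of inspection index q
def pvE (areas : List String) (thermal : List (List (String × String))) (q : Int) : String :=
  List.foldl pvTag "" (thermal.filter (pvSel areas q))

-- A's merged core, recursively over the inspections, carrying the areas already processed
def pvSpecA (thermal : List (List (String × String))) : List String → List (List (String × String)) → List (List (String × String))
  | _, [] => []
  | done, ins :: rest =>
      pvSetDetails ins (List.foldl pvTag (pvGetD ins "details" "")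
        (thermal.filter (fun th => !pvHitAny done th && pvHit (pvAreaLower ins) th)))
        :: pvSpecA thermal (done ++ [pvAreaLower ins]) rest

-- string plumbing ---------------------------------------------------------

theorem pvTag_append (x y : String) (th : List (String × String)) :
    pvTag (x ++ y) th = x ++ pvTag y th := by
  unfold pvTag
  by_cases h : pvGetD th "details" "" ≠ "" <;> simp [h, String.append_assoc]

theorem foldl_pvTag_append (l : List (List (String × String))) (x : String) :
    ∀ y, List.foldl pvTag (x ++ y) l = x ++ List.foldl pvTag y l := by
  induction l with
  | nil => intro y; simp
  | cons h t ih => intro y; simp only [List.foldl_cons, pvTag_append, ih]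

theorem foldl_pvTag_eq (l : List (List (String × String))) (d : String) :
    List.foldl pvTag d l = d ++ List.foldl pvTag "" l := by
  have := foldl_pvTag_append l d ""
  rwa [String.append_empty] at this

-- match-condition bridges --------------------------------------------------

theorem pvHit_empty (a : String) (th : List (String × String)) (h : pvAreaLower th = "") :
    pvHit a th = false := by
  simp [pvHit, h]

theorem pvHit_eq (a : String) (th : List (String × String)) (h : ¬ pvAreaLower th = "") :
    pvHit a th = (a != "" && (PySem.Str.isIn a (pvAreaLower th) || PySem.Str.isIn (pvAreaLower th) a)) := by
  have hb : (pvAreaLower th != "") = true := by simpa using h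
  simp [pvHit, hb]

theorem cond_bridge (a : String) (S : List String) (th : List (String × String)) :
    ∀ P : List String,
      (!pvHitAny P th && pvHit a th) = pvSel (P ++ a :: S) ((P.length : Int)) th := by
  intro P
  by_cases hth : pvAreaLower th = ""
  · simp [pvHit_empty _ _ hth, pvSel, pvFmI, pvFm, hth]
  · induction P with
    | nil =>
        simp only [pvHitAny, List.any_nil, Bool.not_false, Bool.true_and, pvSel, pvFmI, pvFm,
          if_neg hth, pvFirstMatch, List.nil_append, List.findIdx?_cons, List.length_nil]
        rw [← pvHit_eq a th hth]
        cases ha : pvHit a th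
        · cases hS : (S.findIdx? fun a => a != "" && (PySem.Str.isIn a (pvAreaLower th) || PySem.Str.isIn (pvAreaLower th) a)) with
          | none => simp
          | some v => simp; omega
        · simp
    | cons b P' ih =>
        simp only [pvHitAny, List.any_cons, pvSel, pvFmI, pvFm, if_neg hth, pvFirstMatch,
          List.cons_append, List.findIdx?_cons, List.length_cons] at *
        rw [← pvHit_eq b th hth]
        cases hb : pvHit b th
        · simp only [Bool.false_eq_true, if_false, Bool.false_or]
          rw [ih]
          cases hP : ((P' ++ a :: S).findIdx? fun a => a != "" && (PySem.Str.isIn a (pvAreaLower th) || PySem.Str.isIn (pvAreaLower th) a)) with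
          | none => simp
          | some v => simp
        · simp
          omega

theorem hitAny_fm (areas : List String) (th : List (String × String)) :
    pvHitAny areas th = (pvFm areas th).isSome := by
  by_cases hth : pvAreaLower th = ""
  · simp only [pvFm, if_pos hth, Option.isSome_none]
    simp [pvHitAny, pvHit_empty _ _ hth]
  · simp only [pvFm, if_neg hth, pvFirstMatch, List.findIdx?_isSome]
    unfold pvHitAny
    exact PySem.List.any_congr_mem (fun a _ => pvHit_eq a th hth)

-- generic leftover loop ----------------------------------------------------

theorem left_fold (C : PySem.Set Int) (g : List (String × String) → Bool) :
    ∀ (rest : List (List (String × String))) (s : Int) (acc : List (List (String × String))),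
      (∀ (k : Nat) (hk : k < rest.length), C.contains (s + (k : Int)) = g rest[k]) →
      (PySem.List.enumerate rest s).foldl
        (fun m it => if C.contains it.1 then m else m ++ [it.2]) acc
        = acc ++ rest.filter (fun th => !g th) := by
  intro rest
  induction rest with
  | nil => intro s acc _; simp [PySem.List.enumerate_nil]
  | cons th rest' ih =>
      intro s acc h
      rw [PySem.List.enumerate_cons, List.foldl_cons]
      have h0 : C.contains s = g th := by simpa using h 0 (by simp)
      have hrec : ∀ (k : Nat) (hk : k < rest'.length), C.contains ((s + 1) + (k : Int)) = g rest'[k] := by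
        intro k hk
        have := h (k + 1) (by simpa using Nat.succ_lt_succ hk)
        simpa [add_assoc, add_comm, add_left_comm] using this
      cases hg : g th
      · rw [List.filter_cons_of_pos (by simp [hg])]
        rw [h0, hg]
        simp only [Bool.false_eq_true, if_false]
        rw [ih (s + 1) (acc ++ [th]) hrec]
        simp
      · rw [List.filter_cons_of_neg (by simp [hg])]
        rw [h0, hg, if_pos rfl]
        exact ih (s + 1) acc hrec

-- B's scan loop ------------------------------------------------------------

theorem scanB (areas : List String) :
    ∀ (rest : List (List (String × String))) (s : Int) (D : PySem.Dict Int String) (C : PySem.Set Int),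
      (∀ q : Int,
        ((PySem.List.enumerate rest s).foldl
          (fun (st : PySem.Dict Int String × PySem.Set Int) it =>
            if pvAreaLower it.2 = "" then st
            else match pvFirstMatch areas (pvAreaLower it.2) with
              | none => st
              | some j => (st.1.modify (j : Int) "" (fun s => pvTag s it.2), PySem.Set.add st.2 it.1))
          (D, C)).1.getD q ""
          = List.foldl pvTag (D.getD q "") (rest.filter (pvSel areas q)))
      ∧ (∀ n : Int,
        n ∈ ((PySem.List.enumerate rest s).foldl
          (fun (st : PySem.Dict Int String × PySem.Set Int) it =>
            if pvAreaLower it.2 = "" then st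
            else match pvFirstMatch areas (pvAreaLower it.2) with
              | none => st
              | some j => (st.1.modify (j : Int) "" (fun s => pvTag s it.2), PySem.Set.add st.2 it.1))
          (D, C)).2
          ↔ n ∈ C ∨ ∃ (k : Nat), ∃ _ : k < rest.length, n = s + (k : Int) ∧ (pvFm areas rest[k]).isSome) := by
  intro rest
  induction rest with
  | nil =>
      intro s D C
      constructor
      · intro q; simp [PySem.List.enumerate_nil]
      · intro n; simp [PySem.List.enumerate_nil]
  | cons th rest' ih =>
      intro s D C
      rw [PySem.List.enumerate_cons, List.foldl_cons]
      by_cases hth : pvAreaLower th = ""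
      · have hfm : pvFm areas th = none := by simp [pvFm, hth]
        simp only [if_pos hth]
        obtain ⟨ih1, ih2⟩ := ih (s + 1) D C
        constructor
        · intro q
          rw [ih1 q, List.filter_cons_of_neg (by simp [pvSel, pvFmI, hfm])]
        · intro n
          rw [ih2 n]
          constructor
          · rintro (hc | ⟨k, hk, rfl, hs⟩)
            · exact Or.inl hc
            · exact Or.inr ⟨k + 1, by simpa using Nat.succ_lt_succ hk, by push_cast; ring_nf, by simpa using hs⟩
          · rintro (hc | ⟨k, hk, rfl, hs⟩)
            · exact Or.inl hc
            · match k, hk, hs with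
              | 0, _, hs => simp [hfm] at hs
              | k + 1, hk, hs =>
                  exact Or.inr ⟨k, by simpa using Nat.lt_of_succ_lt_succ hk,
                    by push_cast; ring_nf, by simpa using hs⟩
      · simp only [if_neg hth]
        cases hfi : pvFirstMatch areas (pvAreaLower th) with
        | none =>
            have hfm : pvFm areas th = none := by simp [pvFm, hth, hfi]
            obtain ⟨ih1, ih2⟩ := ih (s + 1) D C
            constructor
            · intro q
              rw [ih1 q, List.filter_cons_of_neg (by simp [pvSel, pvFmI, hfm])]
            · intro n
              rw [ih2 n]
              constructor
              · rintro (hc | ⟨k, hk, rfl, hs⟩)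
                · exact Or.inl hc
                · exact Or.inr ⟨k + 1, by simpa using Nat.succ_lt_succ hk, by push_cast; ring_nf, by simpa using hs⟩
              · rintro (hc | ⟨k, hk, rfl, hs⟩)
                · exact Or.inl hc
                · match k, hk, hs with
                  | 0, _, hs => simp [hfm] at hs
                  | k + 1, hk, hs =>
                      exact Or.inr ⟨k, by simpa using Nat.lt_of_succ_lt_succ hk,
                        by push_cast; ring_nf, by simpa using hs⟩
        | some j =>
            have hfm : pvFm areas th = some j := by simp [pvFm, hth, hfi]
            obtain ⟨ih1, ih2⟩ := ih (s + 1) (D.modify (j : Int) "" (fun s => pvTag s th)) (PySem.Set.add C s)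
            constructor
            · intro q
              rw [ih1 q]
              have hmod := PySem.Dict.getD_modify (d := D) (k := (j : Int)) (k' := q) (d0 := "") (f := fun s => pvTag s th)
              by_cases hq : q = (j : Int)
              · rw [List.filter_cons_of_pos (by simp [pvSel, pvFmI, hfm, hq])]
                rw [hmod, if_pos hq, hq, List.foldl_cons]
              · rw [List.filter_cons_of_neg (by simp [pvSel, pvFmI, hfm]; omega)]
                rw [hmod, if_neg hq]
            · intro n
              rw [ih2 n]
              rw [PySem.Set.mem_add]
              constructor
              · rintro ((hc | rfl) | ⟨k, hk, rfl, hs⟩)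
                · exact Or.inl hc
                · exact Or.inr ⟨0, by simp, by simp, by simp [hfm]⟩
                · exact Or.inr ⟨k + 1, by simpa using Nat.succ_lt_succ hk, by push_cast; ring_nf, by simpa using hs⟩
              · rintro (hc | ⟨k, hk, rfl, hs⟩)
                · exact Or.inl (Or.inl hc)
                · match k, hk, hs with
                  | 0, _, _ => exact Or.inl (Or.inr (by simp))
                  | k + 1, hk, hs =>
                      exact Or.inr ⟨k, by simpa using Nat.lt_of_succ_lt_succ hk,
                        by push_cast; ring_nf, by simpa using hs⟩

-- A's inner loop -----------------------------------------------------------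

theorem innerA (done : List String) (a : String) :
    ∀ (rest : List (List (String × String))) (s : Int) (d : String) (U : PySem.Set Int),
      (∀ (k : Nat) (hk : k < rest.length), ((s + (k : Int)) ∈ U ↔ pvHitAny done rest[k] = true)) →
      (((PySem.List.enumerate rest s).foldl
          (fun (p : String × PySem.Set Int) it =>
            if p.2.contains it.1 then p
            else
              if a != "" && pvAreaLower it.2 != "" && (PySem.Str.isIn a (pvAreaLower it.2) || PySem.Str.isIn (pvAreaLower it.2) a) then
                (pvTag p.1 it.2, PySem.Set.add p.2 it.1)
              else p)
          (d, U)).1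
          = List.foldl pvTag d (rest.filter (fun th => !pvHitAny done th && pvHit a th)))
      ∧ (∀ n : Int,
          n ∈ ((PySem.List.enumerate rest s).foldl
          (fun (p : String × PySem.Set Int) it =>
            if p.2.contains it.1 then p
            else
              if a != "" && pvAreaLower it.2 != "" && (PySem.Str.isIn a (pvAreaLower it.2) || PySem.Str.isIn (pvAreaLower it.2) a) then
                (pvTag p.1 it.2, PySem.Set.add p.2 it.1)
              else p)
          (d, U)).2
          ↔ n ∈ U ∨ ∃ (k : Nat), ∃ _ : k < rest.length, n = s + (k : Int) ∧ (!pvHitAny done rest[k] && pvHit a rest[k]) = true) := by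
  intro rest
  induction rest with
  | nil =>
      intro s d U _
      constructor
      · simp [PySem.List.enumerate_nil]
      · intro n; simp [PySem.List.enumerate_nil]
  | cons th rest' ih =>
      intro s d U hU
      rw [PySem.List.enumerate_cons, List.foldl_cons]
      have h0 : (s + ((0 : Nat) : Int)) ∈ U ↔ pvHitAny done th = true := hU 0 (by simp)
      have h0' : s ∈ U ↔ pvHitAny done th = true := by simpa using h0
      have hrec0 : ∀ (k : Nat) (hk : k < rest'.length), (((s + 1) + (k : Int)) ∈ U ↔ pvHitAny done rest'[k] = true) := by
        intro k hk
        have := hU (k + 1) (by simpa using Nat.succ_lt_succ hk)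
        simpa [add_assoc, add_comm, add_left_comm] using this
      have hc : (U.contains s) = pvHitAny done th := by
        rw [Bool.eq_iff_iff, ← h0']
        exact PySem.Set.contains_iff U s
      by_cases hhit : pvHitAny done th = true
      · -- already claimed by an earlier inspection: skipped
        rw [hc, hhit, if_pos rfl]
        obtain ⟨ih1, ih2⟩ := ih (s + 1) d U hrec0
        constructor
        · rw [ih1, List.filter_cons_of_neg (by simp [hhit])]
        · intro n
          rw [ih2 n]
          constructor
          · rintro (hc' | ⟨k, hk, rfl, hs⟩)
            · exact Or.inl hc'
            · exact Or.inr ⟨k + 1, by simpa using Nat.succ_lt_succ hk, by push_cast; ring_nf, by simpa using hs⟩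
          · rintro (hc' | ⟨k, hk, rfl, hs⟩)
            · exact Or.inl hc'
            · match k, hk, hs with
              | 0, _, hs => simp [hhit] at hs
              | k + 1, hk, hs =>
                  exact Or.inr ⟨k, by simpa using Nat.lt_of_succ_lt_succ hk,
                    by push_cast; ring_nf, by simpa using hs⟩
      · rw [hc, if_neg hhit]
        by_cases hm : pvHit a th = true
        · -- newly claimed here
          rw [show (a != "" && pvAreaLower th != "" && (PySem.Str.isIn a (pvAreaLower th) || PySem.Str.isIn (pvAreaLower th) a)) = pvHit a th from rfl, if_pos hm]
          have hrec1 : ∀ (k : Nat) (hk : k < rest'.length), (((s + 1) + (k : Int)) ∈ PySem.Set.add U s ↔ pvHitAny done rest'[k] = true) := by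
            intro k hk
            rw [PySem.Set.mem_add]
            have : ¬ ((s + 1) + (k : Int) = s) := by omega
            simp only [this, or_false]
            exact hrec0 k hk
          obtain ⟨ih1, ih2⟩ := ih (s + 1) (pvTag d th) (PySem.Set.add U s) hrec1
          constructor
          · rw [ih1, List.filter_cons_of_pos (by simp [hhit, hm]), List.foldl_cons]
          · intro n
            rw [ih2 n, PySem.Set.mem_add]
            constructor
            · rintro ((hc' | rfl) | ⟨k, hk, rfl, hs⟩)
              · exact Or.inl hc'
              · exact Or.inr ⟨0, by simp, by simp, by simp [hhit, hm]⟩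
              · exact Or.inr ⟨k + 1, by simpa using Nat.succ_lt_succ hk, by push_cast; ring_nf, by simpa using hs⟩
            · rintro (hc' | ⟨k, hk, rfl, hs⟩)
              · exact Or.inl (Or.inl hc')
              · match k, hk, hs with
                | 0, _, _ => exact Or.inl (Or.inr (by simp))
                | k + 1, hk, hs =>
                    exact Or.inr ⟨k, by simpa using Nat.lt_of_succ_lt_succ hk,
                      by push_cast; ring_nf, by simpa using hs⟩
        · -- no match
          rw [show (a != "" && pvAreaLower th != "" && (PySem.Str.isIn a (pvAreaLower th) || PySem.Str.isIn (pvAreaLower th) a)) = pvHit a th from rfl, if_neg hm]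
          obtain ⟨ih1, ih2⟩ := ih (s + 1) d U hrec0
          constructor
          · rw [ih1, List.filter_cons_of_neg (by simp [hm])]
          · intro n
            rw [ih2 n]
            constructor
            · rintro (hc' | ⟨k, hk, rfl, hs⟩)
              · exact Or.inl hc'
              · exact Or.inr ⟨k + 1, by simpa using Nat.succ_lt_succ hk, by push_cast; ring_nf, by simpa using hs⟩
            · rintro (hc' | ⟨k, hk, rfl, hs⟩)
              · exact Or.inl hc'
              · match k, hk, hs with
                | 0, _, hs => simp [hm] at hs
                | k + 1, hk, hs =>
                    exact Or.inr ⟨k, by simpa using Nat.lt_of_succ_lt_succ hk,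
                      by push_cast; ring_nf, by simpa using hs⟩

-- A's outer loop -----------------------------------------------------------

theorem outerA (thermal : List (List (String × String))) :
    ∀ (rest : List (List (String × String))) (done : List String)
      (acc : List (List (String × String))) (U : PySem.Set Int),
      (∀ (k : Nat) (hk : k < thermal.length), (((k : Int)) ∈ U ↔ pvHitAny done thermal[k] = true)) →
      ((rest.foldl
          (fun (st : List (List (String × String)) × PySem.Set Int) ins =>
            ((st.1 ++ [pvSetDetails ins
              ((PySem.List.enumerate thermal).foldl
                (fun (p : String × PySem.Set Int) it =>
                  if p.2.contains it.1 then p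
                  else
                    if pvAreaLower ins != "" && pvAreaLower it.2 != "" && (PySem.Str.isIn (pvAreaLower ins) (pvAreaLower it.2) || PySem.Str.isIn (pvAreaLower it.2) (pvAreaLower ins)) then
                      (pvTag p.1 it.2, PySem.Set.add p.2 it.1)
                    else p)
                (pvGetD ins "details" "", st.2)).1],
              ((PySem.List.enumerate thermal).foldl
                (fun (p : String × PySem.Set Int) it =>
                  if p.2.contains it.1 then p
                  else
                    if pvAreaLower ins != "" && pvAreaLower it.2 != "" && (PySem.Str.isIn (pvAreaLower ins) (pvAreaLower it.2) || PySem.Str.isIn (pvAreaLower it.2) (pvAreaLower ins)) then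
                      (pvTag p.1 it.2, PySem.Set.add p.2 it.1)
                    else p)
                (pvGetD ins "details" "", st.2)).2)))
          (acc, U)).1
        = acc ++ pvSpecA thermal done rest)
      ∧ (∀ (k : Nat) (hk : k < thermal.length),
          ((k : Int)) ∈ (rest.foldl
          (fun (st : List (List (String × String)) × PySem.Set Int) ins =>
            ((st.1 ++ [pvSetDetails ins
              ((PySem.List.enumerate thermal).foldl
                (fun (p : String × PySem.Set Int) it =>
                  if p.2.contains it.1 then p
                  else
                    if pvAreaLower ins != "" && pvAreaLower it.2 != "" && (PySem.Str.isIn (pvAreaLower ins) (pvAreaLower it.2) || PySem.Str.isIn (pvAreaLower it.2) (pvAreaLower ins)) then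
                      (pvTag p.1 it.2, PySem.Set.add p.2 it.1)
                    else p)
                (pvGetD ins "details" "", st.2)).1],
              ((PySem.List.enumerate thermal).foldl
                (fun (p : String × PySem.Set Int) it =>
                  if p.2.contains it.1 then p
                  else
                    if pvAreaLower ins != "" && pvAreaLower it.2 != "" && (PySem.Str.isIn (pvAreaLower ins) (pvAreaLower it.2) || PySem.Str.isIn (pvAreaLower it.2) (pvAreaLower ins)) then
                      (pvTag p.1 it.2, PySem.Set.add p.2 it.1)
                    else p)
                (pvGetD ins "details" "", st.2)).2)))
          (acc, U)).2
          ↔ pvHitAny (done ++ rest.map pvAreaLower) thermal[k] = true) := by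
  intro rest
  induction rest with
  | nil =>
      intro done acc U hU
      refine ⟨by simp [pvSpecA], ?_⟩
      intro k hk
      simpa using hU k hk
  | cons ins rest' ih =>
      intro done acc U hU
      rw [List.foldl_cons]
      have hU0 : ∀ (k : Nat) (hk : k < thermal.length), (((0 : Int) + (k : Int)) ∈ U ↔ pvHitAny done thermal[k] = true) := by
        intro k hk; simpa using hU k hk
      obtain ⟨hi1, hi2⟩ := innerA done (pvAreaLower ins) thermal 0 (pvGetD ins "details" "") U hU0
      have hU' : ∀ (k : Nat) (hk : k < thermal.length),
          (((k : Int)) ∈ ((PySem.List.enumerate thermal).foldl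
            (fun (p : String × PySem.Set Int) it =>
              if p.2.contains it.1 then p
              else
                if pvAreaLower ins != "" && pvAreaLower it.2 != "" && (PySem.Str.isIn (pvAreaLower ins) (pvAreaLower it.2) || PySem.Str.isIn (pvAreaLower it.2) (pvAreaLower ins)) then
                  (pvTag p.1 it.2, PySem.Set.add p.2 it.1)
                else p)
            (pvGetD ins "details" "", U)).2
            ↔ pvHitAny (done ++ [pvAreaLower ins]) thermal[k] = true) := by
        intro k hk
        rw [hi2 (k : Int)]
        constructor
        · rintro (hc | ⟨k', hk', hkk, hs⟩)
          · have h1 := (hU k hk).1 hc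
            simp only [pvHitAny, List.any_append, Bool.or_eq_true]
            exact Or.inl (by simpa [pvHitAny] using h1)
          · have hkeq : k' = k := by omega
            subst hkeq
            have := (Bool.and_elim_right hs)
            simp [pvHitAny, List.any_append, pvHitAny] at this ⊢
            right
            simpa using this
        · intro hh
          simp only [pvHitAny, List.any_append, List.any_cons, List.any_nil, Bool.or_false,
            Bool.or_eq_true] at hh
          rcases hh with hh | hh
          · exact Or.inl ((hU k hk).2 (by simpa [pvHitAny] using hh))
          · by_cases hdone : pvHitAny done thermal[k] = true
            · exact Or.inl ((hU k hk).2 hdone)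
            · refine Or.inr ⟨k, hk, by simp, ?_⟩
              simp [hdone, hh]
      obtain ⟨ho1, ho2⟩ := ih (done ++ [pvAreaLower ins])
        (acc ++ [pvSetDetails ins ((PySem.List.enumerate thermal).foldl
          (fun (p : String × PySem.Set Int) it =>
            if p.2.contains it.1 then p
            else
              if pvAreaLower ins != "" && pvAreaLower it.2 != "" && (PySem.Str.isIn (pvAreaLower ins) (pvAreaLower it.2) || PySem.Str.isIn (pvAreaLower it.2) (pvAreaLower ins)) then
                (pvTag p.1 it.2, PySem.Set.add p.2 it.1)
              else p)
          (pvGetD ins "details" "", U)).1])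
        (((PySem.List.enumerate thermal).foldl
          (fun (p : String × PySem.Set Int) it =>
            if p.2.contains it.1 then p
            else
              if pvAreaLower ins != "" && pvAreaLower it.2 != "" && (PySem.Str.isIn (pvAreaLower ins) (pvAreaLower it.2) || PySem.Str.isIn (pvAreaLower it.2) (pvAreaLower ins)) then
                (pvTag p.1 it.2, PySem.Set.add p.2 it.1)
              else p)
          (pvGetD ins "details" "", U)).2) hU'
      constructor
      · rw [ho1, hi1]
        simp [pvSpecA, List.append_assoc]
      · intro k hk
        rw [ho2 k hk]
        simp [List.append_assoc]

-- bridge: A's recursive core is B's indexed core ----------------------------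

theorem specA_eq (thermal : List (List (String × String))) (areas : List String) :
    ∀ (rest pre : List (List (String × String))),
      areas = pre.map pvAreaLower ++ rest.map pvAreaLower →
      pvSpecA thermal (pre.map pvAreaLower) rest
        = (PySem.List.enumerate rest ((pre.length : Int))).map
            (fun jt => pvSetDetails jt.2 (pvGetD jt.2 "details" "" ++ pvE areas thermal jt.1)) := by
  intro rest
  induction rest with
  | nil => intro pre _; simp [pvSpecA, PySem.List.enumerate_nil]
  | cons ins rest' ih =>
      intro pre h
      rw [PySem.List.enumerate_cons, List.map_cons]
      unfold pvSpecA
      congr 1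
      · have hcond : ∀ th, (!pvHitAny (pre.map pvAreaLower) th && pvHit (pvAreaLower ins) th)
            = pvSel areas (((pre.map pvAreaLower).length : Int)) th := by
          intro th
          rw [h, List.map_cons]
          exact cond_bridge (pvAreaLower ins) (rest'.map pvAreaLower) th (pre.map pvAreaLower)
        rw [List.filter_congr (fun th _ => hcond th)]
        rw [foldl_pvTag_eq]
        simp [pvE]
      · have hpre : (pre.map pvAreaLower) ++ [pvAreaLower ins] = (pre ++ [ins]).map pvAreaLower := by simp
        rw [hpre, ih (pre ++ [ins]) (by simpa [List.append_assoc] using h)]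
        congr 1
        simp



-- ===== VERDICT (by name: the statement is the Claim_ definition above) =====
theorem merge_observations_spec : Claim_equal_merge_observations := by
  intro inspection thermal _
  unfold Spec_merge_observations
  simp only [merge_observations, merge_observations_alt]
  obtain ⟨hA1, hA2⟩ := outerA thermal inspection [] [] PySem.Set.empty
    (by intro k hk; simp [pvHitAny, PySem.Set.empty])
  obtain ⟨hB1, hB2⟩ := scanB (List.map pvAreaLower inspection) thermal 0 PySem.Dict.empty PySem.Set.empty
  rw [hA1]
  rw [left_fold _ (fun th => pvHitAny (List.map pvAreaLower inspection) th) thermal 0 _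
    (by
      intro k hk
      rw [Bool.eq_iff_iff, PySem.Set.contains_iff]
      simp only [zero_add]
      rw [hA2 k hk]
      simp)]
  rw [PySem.List.foldl_append_singleton_eq_map]
  rw [left_fold _ (fun th => (pvFm (List.map pvAreaLower inspection) th).isSome) thermal 0 _
    (by
      intro k hk
      rw [Bool.eq_iff_iff, PySem.Set.contains_iff]
      simp only [zero_add]
      rw [hB2 (k : Int)]
      constructor
      · rintro (hc | ⟨k', hk', hkk, hs⟩)
        · simp [PySem.Set.empty] at hc
        · have : k' = k := by omega
          subst this; exact hs
      · intro hs
        exact Or.inr ⟨k, hk, by simp, hs⟩)]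
  have hcore := specA_eq thermal (List.map pvAreaLower inspection) inspection []
    (by simp)
  simp only [List.map_nil, List.length_nil, Nat.cast_zero] at hcore
  rw [hcore]
  have hf : (fun (jt : Int × List (String × String)) =>
        pvSetDetails jt.2 (pvGetD jt.2 "details" "" ++
          ((PySem.List.enumerate thermal 0).foldl
            (fun (st : PySem.Dict Int String × PySem.Set Int) it =>
              if pvAreaLower it.2 = "" then st
              else match pvFirstMatch (List.map pvAreaLower inspection) (pvAreaLower it.2) with
                | none => st
                | some j => (st.1.modify (j : Int) "" (fun s => pvTag s it.2), PySem.Set.add st.2 it.1))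
            (PySem.Dict.empty, PySem.Set.empty)).1.getD jt.1 ""))
      = (fun (jt : Int × List (String × String)) =>
        pvSetDetails jt.2 (pvGetD jt.2 "details" "" ++ pvE (List.map pvAreaLower inspection) thermal jt.1)) := by
    funext jt
    rw [hB1 jt.1]
    simp [pvE, PySem.Dict.getD_empty]
  rw [hf]
  rw [List.filter_congr (fun th _ => by rw [hitAny_fm] :
    ∀ th ∈ thermal, (!pvHitAny (List.map pvAreaLower inspection) th)
      = (!(pvFm (List.map pvAreaLower inspection) th).isSome))]
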